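-- pv_equiv track=rewrite | github.com/AshenPheonix/Algorithms | eating_cookies/eating_cookies.py | eating_cookies
-- ===== SOURCE A (Python) =====
-- from itertools import combinations
--
-- def eating_cookies(n, cache=None):
--   if n<=1:
--     return 1
--   elif (cache != None and cache <= 1):
--     return 1
--   else:
--     if cache==None:
--       cache=n
--
--     return (len(list( combinations(range(n),cache) ) ) + eating_cookies(n,cache-1))
-- ===== SOURCE B (Python) =====
-- def eating_cookies(n, cache=None):
--     if n <= 1:
--         return 1
--     if cache is not None and cache <= 1:
--         return 1
--     top = n if cache is None else min(cache, n)
--     total = 1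
--     c = n  # C(n, 1)
--     for k in range(2, top + 1):
--         c = c * (n - k + 1) // k   # C(n, k) from C(n, k-1)
--         total += c
--     return total
-- ===== Notes on version B (the rewrite author's own statement) =====
-- stated objective: alternative
-- what changed: Replaces recursion that materializes every combinations(range(n),k) list with a single loop computing each binomial coefficient C(n,k) from the previous one by the multiplicative identity, capped at min(cache,n).
import Mathlib
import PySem

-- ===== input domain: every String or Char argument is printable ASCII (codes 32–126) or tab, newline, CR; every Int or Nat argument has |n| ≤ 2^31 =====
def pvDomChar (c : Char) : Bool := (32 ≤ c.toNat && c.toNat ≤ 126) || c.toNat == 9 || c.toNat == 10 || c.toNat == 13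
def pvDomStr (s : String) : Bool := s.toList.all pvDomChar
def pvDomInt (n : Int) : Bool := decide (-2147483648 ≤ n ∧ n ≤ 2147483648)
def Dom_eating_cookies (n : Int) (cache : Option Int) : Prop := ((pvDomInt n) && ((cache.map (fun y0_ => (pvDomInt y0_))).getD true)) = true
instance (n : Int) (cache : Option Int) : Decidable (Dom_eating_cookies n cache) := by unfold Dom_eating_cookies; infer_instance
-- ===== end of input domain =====

-- B is a single O(min(cache,n)) loop computing each binomial coefficient from the previous
-- one, instead of A's recursion materializing every combinations list (exponential).

-- ===== PORT A =====
-- len(list(combinations(range(n), k))) = C(n, k); exact here since A only calls it with n ≥ 2, k ≥ 2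
def pvCombsLen (n k : Int) : Int := ((n.toNat.choose k.toNat : Nat) : Int)

-- A's recursive calls always pass an int cache; this is eating_cookies(n, c) for int c
def eating_cookies_go (n c : Int) : Int :=
  if n ≤ 1 then 1
  else if c ≤ 1 then 1
  else pvCombsLen n c + eating_cookies_go n (c - 1)
termination_by c.toNat
decreasing_by simp_wf; omega

def eating_cookies (n : Int) (cache : Option Int) : Int :=
  if n ≤ 1 then 1
  else
    match cache with
    | some c => eating_cookies_go n c            -- 'elif cache <= 1' and the recursion live in _go
    | none   => eating_cookies_go n n            -- 'if cache==None: cache=n'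

-- ===== PORT B =====
-- total = 1; c = C(n,1); for k in range(2, top+1): c = c*(n-k+1)//k; total += c
def eating_cookies_sum (n top : Int) : Int :=
  ((PySem.List.pyRange 2 (top + 1) 1).foldl
    (fun (s : Int × Int) k =>
      let c := PySem.Int.floordiv (s.2 * (n - k + 1)) k
      (s.1 + c, c)) (1, n)).1

def eating_cookies_alt (n : Int) (cache : Option Int) : Int :=
  if n ≤ 1 then 1
  else
    match cache with
    | some c => if c ≤ 1 then 1 else eating_cookies_sum n (min c n)
    | none   => eating_cookies_sum n n

-- ===== PRECONDITION & SPEC =====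
def Spec_eating_cookies (n : Int) (cache : Option Int) (out : Int) : Prop := out = eating_cookies_alt n cache
instance (n : Int) (cache : Option Int) (out : Int) : Decidable (Spec_eating_cookies n cache out) := by unfold Spec_eating_cookies; infer_instance

-- ===== CLAIM (what is proved, stated in full; the proofs are below) =====
def Claim_equal_eating_cookies : Prop := ∀ (n : Int) (cache : Option Int), Dom_eating_cookies n cache → Spec_eating_cookies n cache (eating_cookies n cache)

-- ===== LEMMAS AND PROOFS =====

-- 1 + sum of C(N,k) for k = 2 .. m
def pvSN (N m : Nat) : Nat := ∑ k ∈ Finset.Icc 2 m, N.choose k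

lemma pvSN_le_one {N m : Nat} (h : m ≤ 1) : pvSN N m = 0 := by
  unfold pvSN
  rw [Finset.Icc_eq_empty (by omega)]
  simp

lemma pvSN_succ {N m : Nat} (h : 1 ≤ m) : pvSN N (m + 1) = pvSN N m + N.choose (m + 1) := by
  unfold pvSN
  exact Finset.sum_Icc_succ_top (by omega) _

lemma pvSN_of_ge {N m : Nat} (h : N ≤ m) : pvSN N m = pvSN N N := by
  unfold pvSN
  refine (Finset.sum_subset (Finset.Icc_subset_Icc_right h) ?_).symm
  intro k hk hk'
  simp only [Finset.mem_Icc] at hk hk'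
  exact Nat.choose_eq_zero_of_lt (by omega)

lemma go_eq (n : Int) (hn : 2 ≤ n) : ∀ (c : Int), eating_cookies_go n c = 1 + (pvSN n.toNat c.toNat : Int) := by
  intro c
  induction hm : c.toNat using Nat.strong_induction_on generalizing c with
  | _ m ih =>
    rw [eating_cookies_go]
    by_cases hc : c ≤ 1
    · rw [if_neg (by omega), if_pos hc, pvSN_le_one (by omega)]
      simp
    · rw [if_neg (by omega), if_neg hc]
      have h1 : (c - 1).toNat < m := by omega
      rw [ih _ h1 _ rfl]
      have h2 : (c - 1).toNat + 1 = c.toNat := by omega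
      have h3 : pvSN n.toNat c.toNat = pvSN n.toNat ((c-1).toNat) + n.toNat.choose c.toNat := by
        rw [← h2, pvSN_succ (by omega)]
      rw [← hm, h3]
      unfold pvCombsLen
      push_cast
      omega

lemma sum_fold (n : Int) (hn : 2 ≤ n) : ∀ (t : Nat), 1 ≤ t → (t : Int) ≤ n →
    (PySem.List.pyRange 2 ((t : Int) + 1) 1).foldl
      (fun (s : Int × Int) k =>
        let c := PySem.Int.floordiv (s.2 * (n - k + 1)) k
        (s.1 + c, c)) (1, n)
    = (1 + (pvSN n.toNat t : Int), (n.toNat.choose t : Int)) := by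
  intro t
  induction t with
  | zero => omega
  | succ t ih =>
    intro _ hle
    by_cases ht : t = 0
    · subst ht
      have h2 : ((0 + 1 : Nat) : Int) + 1 = 2 := by norm_num
      rw [h2]
      have hr : PySem.List.pyRange 2 2 = [] := rfl
      rw [hr]
      simp only [List.foldl_nil]
      have hn' : ((n.toNat : Nat) : Int) = n := by omega
      rw [pvSN_le_one (by omega), Nat.choose_one_right, hn']
      norm_num
    · have h1t : 1 ≤ t := by omega
      have hpr : PySem.List.pyRange 2 (((t : Int) + 1) + 1) 1
          = PySem.List.pyRange 2 ((t : Int) + 1) 1 ++ [(t : Int) + 1] := by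
        exact PySem.List.pyRange_one_succ_right (by omega)
      have hcast : (((t : Nat) + 1 : Nat) : Int) + 1 = (((t : Int) + 1) + 1) := by push_cast; ring
      rw [hcast, hpr, List.foldl_append, ih h1t (by omega)]
      simp only [List.foldl]
      -- evaluate the step at k = t+1
      have htn : (t : Int) < n := by omega
      have hN : t < n.toNat := by omega
      have hnum : (n.toNat.choose t : Int) * (n - ((t : Int) + 1) + 1)
          = ((n.toNat.choose (t+1) * (t+1) : Nat) : Int) := by
        rw [Nat.choose_succ_right_eq]
        push_cast [Nat.cast_sub (le_of_lt hN)]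
        have : ((n.toNat : Int)) = n := by omega
        rw [this]; ring
      have hdiv : PySem.Int.floordiv ((n.toNat.choose t : Int) * (n - ((t : Int) + 1) + 1)) ((t : Int) + 1)
          = (n.toNat.choose (t+1) : Int) := by
        rw [hnum]
        have : ((t : Int) + 1) = (((t + 1 : Nat) : Nat) : Int) := by push_cast; ring
        rw [this, PySem.Int.floordiv_natCast, Nat.mul_div_cancel _ (by omega)]
      simp only [hdiv]
      rw [pvSN_succ h1t]
      push_cast
      rw [add_assoc]

-- ===== VERDICT (by name: the statement is the Claim_ definition above) =====
theorem eating_cookies_spec : Claim_equal_eating_cookies := by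
  intro n cache _
  unfold Spec_eating_cookies
  by_cases hn : n ≤ 1
  · rw [eating_cookies.eq_def, eating_cookies_alt.eq_def, if_pos hn, if_pos hn]
  · have hn2 : 2 ≤ n := by omega
    match cache with
    | none =>
      have hA : eating_cookies n none = eating_cookies_go n n := by
        rw [eating_cookies.eq_def, if_neg hn]
      have hB : eating_cookies_alt n none = eating_cookies_sum n n := by
        rw [eating_cookies_alt.eq_def, if_neg hn]
      rw [hA, hB]
      have hcoe : ((n.toNat : Nat) : Int) = n := by omega
      have hf := sum_fold n hn2 n.toNat (by omega) (by omega)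
      rw [hcoe] at hf
      unfold eating_cookies_sum
      rw [hf, go_eq n hn2 n]
    | some c =>
      have hA : eating_cookies n (some c) = eating_cookies_go n c := by
        rw [eating_cookies.eq_def, if_neg hn]
      have hB : eating_cookies_alt n (some c)
          = if c ≤ 1 then 1 else eating_cookies_sum n (min c n) := by
        rw [eating_cookies_alt.eq_def, if_neg hn]
      rw [hA, hB]
      by_cases hc : c ≤ 1
      · rw [if_pos hc, eating_cookies_go, if_neg (by omega), if_pos hc]
      · rw [if_neg hc]
        have hcoe : (((min c n).toNat : Nat) : Int) = min c n := by omega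
        have hf := sum_fold n hn2 (min c n).toNat (by omega) (by omega)
        rw [hcoe] at hf
        unfold eating_cookies_sum
        rw [hf, go_eq n hn2 c]
        have hS : pvSN n.toNat c.toNat = pvSN n.toNat ((min c n).toNat) := by
          by_cases hcn : c ≤ n
          · congr 1; omega
          · have h1 : (min c n).toNat = n.toNat := by omega
            rw [h1, pvSN_of_ge (by omega)]
        rw [hS]
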